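-- pv_equiv track=rewrite | github.com/navidmdn/identity_embedding | src/contrastive_learning.py | build_neighborhood_dict
-- ===== SOURCE A (Python) =====
-- from typing import List, Dict, Tuple
-- from collections import Counter
--
-- def build_neighborhood_dict(list_token_list: List[List[str]]) -> Dict:
--     neighbors = {}
--     for li in list_token_list:
--         for token in li:
--             if token not in neighbors:
--                 neighbors[token] = Counter()
--             rest = [t for t in li if t != token]
--             neighbors[token].update(rest)
--
--     return neighbors
-- ===== SOURCE B (Python) =====
-- from collections import Counter
--
-- def build_neighborhood_dict(list_token_list):
--     # Phase 1: index, per token, the contributions of every list containing it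
--     # (the list itself when the token occurs once, else its count and the list's Counter).
--     occ = {}
--     for li in list_token_list:
--         c = Counter(li)
--         for t, k in c.items():
--             b = occ.get(t)
--             if b is None:
--                 b = occ[t] = []
--             if k == 1:
--                 b.append(li)
--             else:
--                 b.append((k, c))
--     # Phase 2: build each token's neighbor Counter in one go from its contributions.
--     neighbors = {}
--     for t, contribs in occ.items():
--         nt = Counter()
--         u = nt.update
--         g = nt.get
--         for e in contribs:
--             if type(e) is list:
--                 u(e)  # count the whole list at C speed; the self pair is removed below
--             else:
--                 k, c = e
--                 for s, v in c.items():
--                     if s != t: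
--                         nt[s] = g(s, 0) + k * v
--         if t in nt:
--             del nt[t]
--         neighbors[t] = nt
--     return neighbors
-- ===== Notes on version B (the rewrite author's own statement) =====
-- stated objective: alternative
-- what changed: Instead of rebuilding and re-counting a filtered rest list for every token occurrence, B builds one Counter per list, indexes per token the contributions of all lists containing it, and then materialises each token's neighbor Counter in one pass over its contributions, removing the self pair once.
import Mathlib
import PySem

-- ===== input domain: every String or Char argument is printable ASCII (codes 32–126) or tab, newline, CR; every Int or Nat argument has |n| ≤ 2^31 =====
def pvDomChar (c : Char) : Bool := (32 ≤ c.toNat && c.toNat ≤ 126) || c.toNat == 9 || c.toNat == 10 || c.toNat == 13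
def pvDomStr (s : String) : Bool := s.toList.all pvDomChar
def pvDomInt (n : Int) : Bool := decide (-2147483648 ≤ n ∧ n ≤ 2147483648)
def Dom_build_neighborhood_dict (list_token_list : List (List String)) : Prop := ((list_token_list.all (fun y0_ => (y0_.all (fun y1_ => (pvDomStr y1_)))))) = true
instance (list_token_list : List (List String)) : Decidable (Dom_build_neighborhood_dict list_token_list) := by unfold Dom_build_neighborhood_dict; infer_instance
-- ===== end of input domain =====

-- B replaces A's per-occurrence rebuild-and-count of the filtered rest list by a two-phase plan:
-- index, per token, the contributions of all lists containing it, then build each token's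
-- neighbor Counter in one pass over those contributions, removing the self pair once.

-- ===== PORT A =====
-- neighbors : dict token → Counter; Counter ported as PySem.Dict String Int;
-- neighbors[token].update(rest) is: for s in rest: cnt[s] = cnt.get(s, 0) + 1, i.e. modify s 0 (·+1).
def build_neighborhood_dict (list_token_list : List (List String)) : List (String × List (String × Int)) :=
  let neighbors : PySem.Dict String (PySem.Dict String Int) :=
    list_token_list.foldl (fun neighbors li =>
      li.foldl (fun neighbors token =>
        let neighbors :=
          if neighbors.contains token then neighbors
          else neighbors.insert token PySem.Dict.empty
        let rest := li.filter (fun t => t != token)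
        neighbors.modify token PySem.Dict.empty
          (fun c => rest.foldl (fun c s => c.modify s 0 (· + 1)) c)) neighbors)
      PySem.Dict.empty
  neighbors.items.map (fun p => (p.1, p.2.items))

-- ===== PORT B =====
-- Phase 1: occ[t] = the contributions of each list containing t (the list itself when t occurs
-- once, else (count, Counter)); phase 2 builds each token's Counter in one pass; 'del nt[t]'
-- removes the self pair. 'b = occ[t] = []' + append is occ.modify t [] (· ++ [e]).
def build_neighborhood_dict_alt (list_token_list : List (List String)) : List (String × List (String × Int)) :=
  let occ : PySem.Dict String (List (Sum (List String) (Int × PySem.Dict String Int))) :=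
    list_token_list.foldl (fun occ li =>
      let c := PySem.Dict.counter li
      c.items.foldl (fun occ tk =>
        occ.modify tk.1 []
          (fun b => b ++ [if tk.2 == 1 then Sum.inl li else Sum.inr (tk.2, c)])) occ)
      PySem.Dict.empty
  let neighbors : PySem.Dict String (PySem.Dict String Int) :=
    occ.items.foldl (fun nbs p =>
      let nt := p.2.foldl (fun nt e =>
        match e with
        | Sum.inl li => li.foldl (fun nt s => nt.modify s 0 (· + 1)) nt
        | Sum.inr kc => kc.2.items.foldl (fun nt sv =>
            if sv.1 != p.1 then nt.modify sv.1 0 (· + kc.1 * sv.2) else nt) nt)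
        PySem.Dict.empty
      let nt := if nt.contains p.1 then nt.erase p.1 else nt
      nbs.insert p.1 nt) PySem.Dict.empty
  neighbors.items.map (fun q => (q.1, q.2.items))

-- ===== PRECONDITION & SPEC =====
def Spec_build_neighborhood_dict (list_token_list : List (List String)) (out : List (String × List (String × Int))) : Prop := out = build_neighborhood_dict_alt list_token_list
instance (list_token_list : List (List String)) (out : List (String × List (String × Int))) : Decidable (Spec_build_neighborhood_dict list_token_list out) := by unfold Spec_build_neighborhood_dict; infer_instance

-- ===== CLAIM (what is proved, stated in full; the proofs are below) =====
def Claim_equal_build_neighborhood_dict : Prop := ∀ (list_token_list : List (List String)), Dom_build_neighborhood_dict list_token_list → Spec_build_neighborhood_dict list_token_list (build_neighborhood_dict list_token_list)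

-- ===== LEMMAS AND PROOFS =====

-- Both per-list loops share one shape: for each token t of a list l, ensure key t is present,
-- then transform the counter stored at t by a per-token function h t.
def pvStep (h : String → PySem.Dict String Int → PySem.Dict String Int)
    (nb : PySem.Dict String (PySem.Dict String Int)) (t : String) :
    PySem.Dict String (PySem.Dict String Int) :=
  (if nb.contains t then nb else nb.insert t PySem.Dict.empty).modify t PySem.Dict.empty (h t)

def pvLoop (h : String → PySem.Dict String Int → PySem.Dict String Int)
    (nb : PySem.Dict String (PySem.Dict String Int)) (l : List String) :
    PySem.Dict String (PySem.Dict String Int) :=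
  l.foldl (fun nb t =>
    (if nb.contains t then nb else nb.insert t PySem.Dict.empty).modify t PySem.Dict.empty (h t)) nb

-- A's inner counter update ('for s in rest: c[s] += 1') and k-fold application of a map
def pvUpdA (r : List String) (c : PySem.Dict String Int) : PySem.Dict String Int :=
  r.foldl (fun c s => c.modify s 0 (· + 1)) c

def pvIter (f : PySem.Dict String Int → PySem.Dict String Int) :
    Nat → PySem.Dict String Int → PySem.Dict String Int
  | 0, c => c
  | k + 1, c => pvIter f k (f c)

-- the two ports, rewritten with the shared loop shape (definitional)
theorem portA_eq (lts : List (List String)) :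
    build_neighborhood_dict lts =
      ((lts.foldl (fun nb li => pvLoop (fun t => pvUpdA (li.filter (fun s => s != t))) nb li)
        PySem.Dict.empty).items.map (fun p => (p.1, p.2.items))) := rfl

-- ---- one pvLoop step ----
theorem pvLoop_cons (h : String → PySem.Dict String Int → PySem.Dict String Int)
    (nb : PySem.Dict String (PySem.Dict String Int)) (t : String) (l : List String) :
    pvLoop h nb (t :: l) = pvLoop h (pvStep h nb t) l := rfl

theorem pvStep_getD_pre (nb : PySem.Dict String (PySem.Dict String Int)) (t : String) :
    (if nb.contains t then nb else nb.insert t PySem.Dict.empty).getD t PySem.Dict.empty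
      = nb.getD t PySem.Dict.empty := by
  by_cases hc : nb.contains t
  · simp [hc]
  · simp only [hc, Bool.false_eq_true, if_false]
    rw [PySem.Dict.getD_insert_self, PySem.Dict.getD_of_not_contains nb PySem.Dict.empty (by simpa using hc)]

theorem pvStep_get?_self (h : String → PySem.Dict String Int → PySem.Dict String Int)
    (nb : PySem.Dict String (PySem.Dict String Int)) (t : String) :
    (pvStep h nb t).get? t = some (h t (nb.getD t PySem.Dict.empty)) := by
  show ((if nb.contains t then nb else nb.insert t PySem.Dict.empty).insert t _).get? t = _
  rw [PySem.Dict.get?_insert_self, pvStep_getD_pre]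

theorem pvStep_getD_self (h : String → PySem.Dict String Int → PySem.Dict String Int)
    (nb : PySem.Dict String (PySem.Dict String Int)) (t : String) :
    (pvStep h nb t).getD t PySem.Dict.empty = h t (nb.getD t PySem.Dict.empty) :=
  PySem.Dict.getD_of_get?_eq_some _ PySem.Dict.empty (pvStep_get?_self h nb t)

theorem pvStep_get?_ne (h : String → PySem.Dict String Int → PySem.Dict String Int)
    (nb : PySem.Dict String (PySem.Dict String Int)) (t x : String) (hx : x ≠ t) :
    (pvStep h nb t).get? x = nb.get? x := by
  show ((if nb.contains t then nb else nb.insert t PySem.Dict.empty).insert t _).get? x = _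
  rw [PySem.Dict.get?_insert_of_ne _ _ hx]
  by_cases hc : nb.contains t
  · simp [hc]
  · simp only [hc, Bool.false_eq_true, if_false]
    rw [PySem.Dict.get?_insert_of_ne _ _ hx]

theorem pvStep_getD_ne (h : String → PySem.Dict String Int → PySem.Dict String Int)
    (nb : PySem.Dict String (PySem.Dict String Int)) (t x : String) (hx : x ≠ t) :
    (pvStep h nb t).getD x PySem.Dict.empty = nb.getD x PySem.Dict.empty := by
  rw [PySem.Dict.getD_eq_get?_getD, pvStep_get?_ne h nb t x hx, ← PySem.Dict.getD_eq_get?_getD]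

theorem pvStep_keys (h : String → PySem.Dict String Int → PySem.Dict String Int)
    (nb : PySem.Dict String (PySem.Dict String Int)) (t : String) :
    (pvStep h nb t).keys = PySem.Set.add nb.keys t := by
  unfold pvStep
  rw [PySem.Dict.keys_modify]
  by_cases hc : nb.contains t
  · simp only [hc, if_true]
    rw [PySem.Dict.keys_insert_of_contains _ _ hc,
      PySem.Set.add_of_mem (by rwa [← PySem.Dict.contains_iff_mem_keys])]
  · simp only [hc, Bool.false_eq_true, if_false]
    rw [PySem.Dict.insert_insert_self,
      PySem.Dict.keys_insert_of_not_contains _ _ (by simpa using hc),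
      PySem.Set.add_of_not_mem (by rw [← PySem.Dict.contains_iff_mem_keys]; simpa using hc)]

-- ---- pvLoop characterisation ----
theorem pvLoop_get? (h : String → PySem.Dict String Int → PySem.Dict String Int)
    (l : List String) (nb : PySem.Dict String (PySem.Dict String Int)) (x : String) :
    (pvLoop h nb l).get? x =
      if l.count x = 0 then nb.get? x
      else some (pvIter (h x) (l.count x) (nb.getD x PySem.Dict.empty)) := by
  induction l generalizing nb with
  | nil => simp [pvLoop]
  | cons t l' ih =>
    rw [pvLoop_cons, ih]
    by_cases hx : x = t
    · subst hx
      rw [List.count_cons_self]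
      by_cases h0 : l'.count x = 0
      · simp only [h0, if_true, if_neg (by omega : ¬ (0 + 1 = 0)), pvStep_get?_self]
        rfl
      · simp only [if_neg h0, if_neg (by omega : ¬ (l'.count x + 1 = 0)), pvStep_getD_self]
        rfl
    · rw [List.count_cons_of_ne (fun he => hx he.symm), pvStep_get?_ne h nb t x hx, pvStep_getD_ne h nb t x hx]

theorem pvLoop_keys (h : String → PySem.Dict String Int → PySem.Dict String Int)
    (l : List String) (nb : PySem.Dict String (PySem.Dict String Int)) :
    (pvLoop h nb l).keys = PySem.Set.update nb.keys l := by
  induction l generalizing nb with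
  | nil => rfl
  | cons t l' ih =>
    rw [pvLoop_cons, ih, pvStep_keys, PySem.Set.update_cons]

-- ---- set facts ----
theorem pvUpdate_update_self (s : PySem.Set String) (r : List String) :
    PySem.Set.update (PySem.Set.update s r) r = PySem.Set.update s r := by
  rw [PySem.Set.update_eq_append_filter (PySem.Set.update s r) r,
      PySem.Set.update_eq_append_filter s r]
  have : List.filter (fun y => !(PySem.Set.update s r).contains y) (PySem.Set.ofList r) = [] := by
    rw [List.filter_eq_nil_iff]
    intro y hy
    have : y ∈ PySem.Set.update s r := by
      rw [PySem.Set.mem_update]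
      exact Or.inr ((PySem.Set.mem_ofList _ _).mp hy)
    simp [this]
  rw [PySem.Set.update_eq_append_filter s r] at this
  rw [this, List.append_nil]

theorem pvOfList_filter (p : String → Bool) (l : List String) :
    PySem.Set.ofList (l.filter p) = (PySem.Set.ofList l).filter p := by
  induction l using List.reverseRecOn with
  | nil => rfl
  | append_singleton xs x ih =>
    rw [List.filter_append, PySem.Set.ofList_append_singleton]
    by_cases hp : p x
    · simp only [List.filter_cons, hp, if_true, List.filter_nil,
        PySem.Set.ofList_append_singleton, ih]
      rw [PySem.Set.add_eq_ite, PySem.Set.add_eq_ite]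
      by_cases hm : x ∈ PySem.Set.ofList xs
      · rw [if_pos hm, if_pos (by rw [List.mem_filter]; exact ⟨hm, hp⟩)]
      · rw [if_neg hm, if_neg (fun hc => hm (List.mem_of_mem_filter hc)), List.filter_append]
        simp [hp]
    · simp only [List.filter_cons, hp, Bool.false_eq_true, if_false, List.filter_nil,
        List.append_nil, ih]
      rw [PySem.Set.add_eq_ite]
      by_cases hm : x ∈ PySem.Set.ofList xs
      · rw [if_pos hm]
      · rw [if_neg hm, List.filter_append]
        simp [hp]

-- ---- A's iterated counter update ----
theorem pvUpdA_keys (r : List String) (c : PySem.Dict String Int) :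
    (pvUpdA r c).keys = PySem.Set.update c.keys r :=
  PySem.Dict.keys_foldl_modify r 0 (fun _ _ => (· + 1)) c

theorem pvUpdA_getD (r : List String) (c : PySem.Dict String Int) (s : String) :
    (pvUpdA r c).getD s 0 = c.getD s 0 + (r.count s : Int) :=
  PySem.Dict.getD_foldl_modify_add_one r c s

theorem pvIter_updA_getD (r : List String) (k : Nat) (c : PySem.Dict String Int) (s : String) :
    (pvIter (pvUpdA r) k c).getD s 0 = c.getD s 0 + (k : Int) * (r.count s : Int) := by
  induction k generalizing c with
  | zero => simp [pvIter]
  | succ k ih =>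
    show (pvIter (pvUpdA r) k (pvUpdA r c)).getD s 0 = _
    rw [ih, pvUpdA_getD]
    push_cast
    ring

theorem pvIter_updA_keys (r : List String) (k : Nat) (hk : k ≠ 0) (c : PySem.Dict String Int) :
    (pvIter (pvUpdA r) k c).keys = PySem.Set.update c.keys r := by
  induction k generalizing c with
  | zero => omega
  | succ k ih =>
    show (pvIter (pvUpdA r) k (pvUpdA r c)).keys = _
    by_cases h0 : k = 0
    · subst h0; exact pvUpdA_keys r c
    · rw [ih h0, pvUpdA_keys, pvUpdate_update_self]

-- getD through a modify-loop over a Nodup list with per-key increments (B's inner loop)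
theorem pvGetD_foldl_modify_add_g (l : List String) (g : String → Int)
    (d : PySem.Dict String Int) (x : String) (hl : l.Nodup) :
    (l.foldl (fun d s => d.modify s 0 (fun v => v + g s)) d).getD x 0
      = d.getD x 0 + if x ∈ l then g x else 0 := by
  induction l generalizing d with
  | nil => simp
  | cons s l' ih =>
    rw [List.foldl_cons, ih _ (List.Nodup.of_cons hl)]
    by_cases hx : x = s
    · subst hx
      rw [PySem.Dict.getD_modify]
      simp only [List.mem_cons, true_or, if_true,
        if_neg (by exact (List.nodup_cons.mp hl).1)]
      ring
    · rw [PySem.Dict.getD_modify, if_neg hx]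
      simp only [List.mem_cons, hx, false_or]


-- ---- B-side objects ----
-- per-list contribution of a list containing t (what phase 1 appends)
def pvContrib (li : List String) (t : String) : Sum (List String) (Int × PySem.Dict String Int) :=
  if ((li.count t : Int) == 1) then Sum.inl li else Sum.inr ((li.count t : Int), PySem.Dict.counter li)

-- phase 2's per-contribution merge
def pvApply (t : String) (nt : PySem.Dict String Int) :
    Sum (List String) (Int × PySem.Dict String Int) → PySem.Dict String Int
  | Sum.inl li => li.foldl (fun nt s => nt.modify s 0 (· + 1)) nt
  | Sum.inr kc => kc.2.items.foldl (fun nt sv =>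
      if sv.1 != t then nt.modify sv.1 0 (· + kc.1 * sv.2) else nt) nt

-- phase 2's per-token result
def pvFinal (t : String) (contribs : List (Sum (List String) (Int × PySem.Dict String Int))) :
    PySem.Dict String Int :=
  let nt := contribs.foldl (pvApply t) PySem.Dict.empty
  if nt.contains t then nt.erase t else nt

-- A's net per-list effect on the counter of token x
def pvG (x : String) (c : PySem.Dict String Int) (li : List String) : PySem.Dict String Int :=
  pvIter (pvUpdA (li.filter (fun s => s != x))) (li.count x) c

-- B's phase-1 dict
def pvOcc (lts : List (List String)) : PySem.Dict String (List (Sum (List String) (Int × PySem.Dict String Int))) :=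
  lts.foldl (fun occ li =>
    (PySem.Dict.counter li).items.foldl (fun occ tk =>
      occ.modify tk.1 []
        (fun b => b ++ [if tk.2 == 1 then Sum.inl li else Sum.inr (tk.2, PySem.Dict.counter li)])) occ)
    PySem.Dict.empty

theorem portB_eq (lts : List (List String)) :
    build_neighborhood_dict_alt lts =
      (((pvOcc lts).items.foldl (fun nbs p =>
          nbs.insert p.1 (pvFinal p.1 p.2)) PySem.Dict.empty).items.map
        (fun q => (q.1, q.2.items))) := rfl

-- ===== A-side global characterisation =====
theorem pvAfold_keys (lts : List (List String)) (nb : PySem.Dict String (PySem.Dict String Int)) :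
    (lts.foldl (fun nb li => pvLoop (fun t => pvUpdA (li.filter (fun s => s != t))) nb li) nb).keys
      = lts.foldl (fun s li => PySem.Set.update s li) nb.keys := by
  induction lts generalizing nb with
  | nil => rfl
  | cons li lts' ih =>
    rw [List.foldl_cons, List.foldl_cons, ih, pvLoop_keys]

theorem pvG_id (x : String) (c : PySem.Dict String Int) (li : List String) (h : x ∉ li) :
    pvG x c li = c := by
  unfold pvG
  rw [List.count_eq_zero.mpr h]
  rfl

theorem pvAfold_get? (lts : List (List String)) (nb : PySem.Dict String (PySem.Dict String Int)) (x : String) :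
    (lts.foldl (fun nb li => pvLoop (fun t => pvUpdA (li.filter (fun s => s != t))) nb li) nb).get? x
      = if (∀ li ∈ lts, x ∉ li) then nb.get? x
        else some (lts.foldl (pvG x) (nb.getD x PySem.Dict.empty)) := by
  induction lts generalizing nb with
  | nil => simp
  | cons li lts' ih =>
    rw [List.foldl_cons, List.foldl_cons, ih]
    have hstep := pvLoop_get? (fun t => pvUpdA (li.filter (fun s => s != t))) li nb x
    by_cases hxli : x ∈ li
    · have hcnt : li.count x ≠ 0 := by have := List.count_pos_iff.mpr hxli; omega
      have hcons : ¬ (∀ li' ∈ li :: lts', x ∉ li') :=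
        fun hall => (hall li (List.mem_cons_self)) hxli
      have hg : (pvLoop (fun t => pvUpdA (li.filter (fun s => s != t))) nb li).get? x
          = some (pvG x (nb.getD x PySem.Dict.empty) li) := by
        rw [hstep, if_neg hcnt]; rfl
      have hgd : (pvLoop (fun t => pvUpdA (li.filter (fun s => s != t))) nb li).getD x PySem.Dict.empty
          = pvG x (nb.getD x PySem.Dict.empty) li :=
        PySem.Dict.getD_of_get?_eq_some _ PySem.Dict.empty hg
      rw [if_neg hcons]
      by_cases hall' : ∀ li' ∈ lts', x ∉ li'
      · rw [if_pos hall', hg]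
        congr 1
        exact ((PySem.List.foldl_congr_mem lts' (pvG x) (fun c _ => c) _
          (fun acc li' hm => pvG_id x acc li' (hall' li' hm))).trans
          (PySem.List.foldl_ignore lts' _)).symm
      · rw [if_neg hall', hgd]
    · have hcnt : li.count x = 0 := List.count_eq_zero.mpr hxli
      have hg : (pvLoop (fun t => pvUpdA (li.filter (fun s => s != t))) nb li).get? x = nb.get? x := by
        rw [hstep, if_pos hcnt]
      have hgd : (pvLoop (fun t => pvUpdA (li.filter (fun s => s != t))) nb li).getD x PySem.Dict.empty
          = nb.getD x PySem.Dict.empty := by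
        rw [PySem.Dict.getD_eq_get?_getD, hg, ← PySem.Dict.getD_eq_get?_getD]
      by_cases hall' : ∀ li' ∈ lts', x ∉ li'
      · have hcons : ∀ li' ∈ li :: lts', x ∉ li' := by
          intro li' hm
          rcases List.mem_cons.mp hm with h1 | h2
          · subst h1; exact hxli
          · exact hall' li' h2
        rw [if_pos hall', hg, if_pos hcons]
      · have hcons : ¬ (∀ li' ∈ li :: lts', x ∉ li') :=
          fun h => hall' (fun li' hm => h li' (List.mem_cons_of_mem _ hm))
        rw [if_neg hall', hgd, if_neg hcons, pvG_id x _ li hxli]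

-- ===== B-side phase 1 characterisation =====
theorem pvUpdate_ofList (s : PySem.Set String) (l : List String) :
    PySem.Set.update s (PySem.Set.ofList l) = PySem.Set.update s l := by
  rw [PySem.Set.update_eq_append_filter, PySem.Set.update_eq_append_filter, PySem.Set.ofList_ofList]

theorem pvOcc_keys (lts : List (List String)) :
    (pvOcc lts).keys = lts.foldl (fun s li => PySem.Set.update s li) [] := by
  have main : ∀ (lts : List (List String)) (occ0 : PySem.Dict String (List (Sum (List String) (Int × PySem.Dict String Int)))),
      (lts.foldl (fun occ li =>
        (PySem.Dict.counter li).items.foldl (fun occ tk =>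
          occ.modify tk.1 []
            (fun b => b ++ [if tk.2 == 1 then Sum.inl li else Sum.inr (tk.2, PySem.Dict.counter li)])) occ) occ0).keys
      = lts.foldl (fun s li => PySem.Set.update s li) occ0.keys := by
    intro lts
    induction lts with
    | nil => intro occ0; rfl
    | cons li lts' ih =>
      intro occ0
      rw [List.foldl_cons, List.foldl_cons, ih]
      congr 1
      rw [PySem.Dict.keys_foldl_modify_key _ Prod.fst [] _ occ0]
      show PySem.Set.update occ0.keys ((PySem.Dict.counter li).items.map (·.1)) = _
      have : (PySem.Dict.counter li).items.map (·.1) = (PySem.Dict.counter li).keys := rfl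
      rw [this, PySem.Dict.keys_counter, pvUpdate_ofList]
  exact main lts PySem.Dict.empty

theorem pvOcc_nodup (lts : List (List String)) : (pvOcc lts).keys.Nodup := by
  have main : ∀ (lts : List (List String)) (occ0 : PySem.Dict String (List (Sum (List String) (Int × PySem.Dict String Int)))),
      occ0.keys.Nodup →
      (lts.foldl (fun occ li =>
        (PySem.Dict.counter li).items.foldl (fun occ tk =>
          occ.modify tk.1 []
            (fun b => b ++ [if tk.2 == 1 then Sum.inl li else Sum.inr (tk.2, PySem.Dict.counter li)])) occ) occ0).keys.Nodup := by
    intro lts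
    induction lts with
    | nil => intro occ0 h; exact h
    | cons li lts' ih =>
      intro occ0 h
      rw [List.foldl_cons]
      exact ih _ (PySem.Dict.nodup_keys_foldl_modify_key _ Prod.fst [] _ occ0 h)
  exact main lts PySem.Dict.empty (by rw [PySem.Dict.keys_empty]; exact List.nodup_nil)

theorem pvOcc_getD (lts : List (List String)) (t : String) :
    (pvOcc lts).getD t [] = (lts.filter (fun li => decide (t ∈ li))).map (fun li => pvContrib li t) := by
  have main : ∀ (lts : List (List String)) (occ0 : PySem.Dict String (List (Sum (List String) (Int × PySem.Dict String Int)))),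
      (lts.foldl (fun occ li =>
        (PySem.Dict.counter li).items.foldl (fun occ tk =>
          occ.modify tk.1 []
            (fun b => b ++ [if tk.2 == 1 then Sum.inl li else Sum.inr (tk.2, PySem.Dict.counter li)])) occ) occ0).getD t []
      = occ0.getD t [] ++ (lts.filter (fun li => decide (t ∈ li))).map (fun li => pvContrib li t) := by
    intro lts
    induction lts with
    | nil => intro occ0; simp
    | cons li lts' ih =>
      intro occ0
      rw [List.foldl_cons, ih]
      have hinner : ((PySem.Dict.counter li).items.foldl (fun occ tk =>
          occ.modify tk.1 []
            (fun b => b ++ [if tk.2 == 1 then Sum.inl li else Sum.inr (tk.2, PySem.Dict.counter li)])) occ0).getD t []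
          = occ0.getD t [] ++ (if t ∈ li then [pvContrib li t] else []) := by
        have hshape : ((PySem.Dict.counter li).items.map (fun tk =>
              (tk.1, if tk.2 == 1 then Sum.inl li else Sum.inr (tk.2, PySem.Dict.counter li)))).foldl
              (fun occ p => occ.modify p.1 [] (fun b => b ++ [p.2])) occ0
            = (PySem.Dict.counter li).items.foldl (fun occ tk =>
              occ.modify tk.1 []
                (fun b => b ++ [if tk.2 == 1 then Sum.inl li else Sum.inr (tk.2, PySem.Dict.counter li)])) occ0 :=
          List.foldl_map
        rw [← hshape, PySem.Dict.getD_foldl_modify_append]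
        congr 1
        rw [List.filter_map, List.map_map, PySem.Dict.items_counter, List.filter_map, List.map_map]
        simp only [Function.comp_def]
        rw [List.filter_beq]
        by_cases hm : t ∈ li
        · rw [List.count_eq_one_of_mem (PySem.Set.nodup_ofList li) ((PySem.Set.mem_ofList li t).mpr hm),
            if_pos hm]
          simp only [List.replicate, List.map_cons, List.map_nil]
          unfold pvContrib
          rfl
        · rw [List.count_eq_zero.mpr (fun hc => hm ((PySem.Set.mem_ofList li t).mp hc)), if_neg hm]
          rfl
      rw [hinner, List.filter_cons]
      by_cases hm : t ∈ li
      · simp only [hm, decide_true, if_true, List.map_cons, List.append_assoc, List.singleton_append]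
      · simp only [hm, decide_false, Bool.false_eq_true, if_false, List.append_nil]
  unfold pvOcc
  rw [main lts PySem.Dict.empty, PySem.Dict.getD_empty, List.nil_append]

-- ===== per-token equality of the two accumulations =====
theorem pvFilter_update (p : String → Bool) (K : PySem.Set String) (l : List String) :
    (PySem.Set.update K l).filter p = PySem.Set.update (K.filter p) (l.filter p) := by
  rw [PySem.Set.update_eq_append_filter, PySem.Set.update_eq_append_filter, List.filter_append,
    List.filter_filter, pvOfList_filter, List.filter_filter]
  congr 1
  apply List.filter_congr
  intro y _
  simp only [PySem.Set.contains_eq_listContains]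
  by_cases hm : y ∈ K <;> by_cases hp : p y = true <;>
    simp [hm, hp, List.mem_filter]

theorem pvApply_inr (t : String) (k : Int) (li : List String) (nt : PySem.Dict String Int) :
    pvApply t nt (Sum.inr (k, PySem.Dict.counter li))
      = ((PySem.Set.ofList li).filter (fun s => s != t)).foldl
          (fun nt s => nt.modify s 0 (· + k * (li.count s : Int))) nt := by
  show (PySem.Dict.counter li).items.foldl (fun nt sv =>
      if sv.1 != t then nt.modify sv.1 0 (· + k * sv.2) else nt) nt = _
  rw [PySem.Dict.items_counter, List.foldl_map]
  show (PySem.Set.ofList li).foldl (fun nt s =>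
      if (s != t) = true then nt.modify s 0 (· + k * (li.count s : Int)) else nt) nt = _
  exact PySem.List.foldl_if_eq_foldl_filter (fun s => s != t)
    (fun nt s => nt.modify s 0 (· + k * (li.count s : Int))) _ nt

theorem pvFFilter (t : String) (li : List String) :
    ((PySem.Set.ofList li).filter (fun s => s != t)).filter (fun s => s != t)
      = (PySem.Set.ofList li).filter (fun s => s != t) := by
  rw [List.filter_filter]
  exact List.filter_congr (fun y _ => by rw [Bool.and_self])

theorem pvUpdate_F_eq_rest (a : PySem.Set String) (t : String) (li : List String) :
    PySem.Set.update a ((PySem.Set.ofList li).filter (fun s => s != t))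
      = PySem.Set.update a (li.filter (fun s => s != t)) := by
  rw [PySem.Set.update_eq_append_filter, PySem.Set.update_eq_append_filter,
    PySem.Set.ofList_eq_self_of_nodup _ (List.Nodup.filter _ (PySem.Set.nodup_ofList li)),
    pvOfList_filter]

theorem pvPairStep (t : String) (li : List String) (hli : t ∈ li)
    (w a : PySem.Dict String Int)
    (h1 : w.keys.filter (fun s => s != t) = a.keys)
    (h2 : ∀ s, s ≠ t → w.getD s 0 = a.getD s 0)
    (h3 : w.keys.Nodup) (h4 : a.keys.Nodup) :
    (pvApply t w (pvContrib li t)).keys.filter (fun s => s != t) = (pvG t a li).keys ∧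
      (∀ s, s ≠ t → (pvApply t w (pvContrib li t)).getD s 0 = (pvG t a li).getD s 0) ∧
      (pvApply t w (pvContrib li t)).keys.Nodup ∧ (pvG t a li).keys.Nodup := by
  have hcnt : li.count t ≠ 0 := by have := List.count_pos_iff.mpr hli; omega
  have hGkeys : (pvG t a li).keys = PySem.Set.update a.keys (li.filter (fun s => s != t)) :=
    pvIter_updA_keys _ _ hcnt a
  have hGgetD : ∀ s, (pvG t a li).getD s 0
      = a.getD s 0 + (li.count t : Int) * ((li.filter (fun s => s != t)).count s : Int) :=
    fun s => pvIter_updA_getD _ _ a s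
  have hGnodup : (pvG t a li).keys.Nodup := by
    rw [hGkeys]; exact PySem.Set.nodup_update _ _ h4
  have hrest : ∀ s, s ≠ t → (li.filter (fun s => s != t)).count s = li.count s := by
    intro s hs
    exact List.count_filter (by simpa [bne_iff_ne] using hs)
  unfold pvContrib
  by_cases hk : ((li.count t : Int) == 1) = true
  · rw [if_pos hk]
    have hWA : pvApply t w (Sum.inl li) = pvUpdA li w := rfl
    rw [hWA]
    refine ⟨?_, ?_, ?_, hGnodup⟩
    · rw [pvUpdA_keys, pvFilter_update, h1, hGkeys]
    · intro s hs
      rw [pvUpdA_getD, hGgetD, hrest s hs, h2 s hs]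
      have : (li.count t : Int) = 1 := by simpa using hk
      rw [this, one_mul]
    · rw [pvUpdA_keys]; exact PySem.Set.nodup_update _ _ h3
  · rw [if_neg hk]
    rw [pvApply_inr]
    have hFnodup : ((PySem.Set.ofList li).filter (fun s => s != t)).Nodup :=
      List.Nodup.filter _ (PySem.Set.nodup_ofList li)
    have hWkeys : (((PySem.Set.ofList li).filter (fun s => s != t)).foldl
        (fun nt s => nt.modify s 0 (· + (li.count t : Int) * (li.count s : Int))) w).keys
        = PySem.Set.update w.keys ((PySem.Set.ofList li).filter (fun s => s != t)) :=
      PySem.Dict.keys_foldl_modify _ 0 (fun _ s => (· + (li.count t : Int) * (li.count s : Int))) w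
    have hWgetD : ∀ s, (((PySem.Set.ofList li).filter (fun s => s != t)).foldl
        (fun nt s => nt.modify s 0 (· + (li.count t : Int) * (li.count s : Int))) w).getD s 0
        = w.getD s 0 + if s ∈ (PySem.Set.ofList li).filter (fun s => s != t)
            then (li.count t : Int) * (li.count s : Int) else 0 := by
      intro s
      exact pvGetD_foldl_modify_add_g _ (fun s => (li.count t : Int) * (li.count s : Int)) w s hFnodup
    refine ⟨?_, ?_, ?_, hGnodup⟩
    · rw [hWkeys, pvFilter_update, h1, pvFFilter, pvUpdate_F_eq_rest, hGkeys]
    · intro s hs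
      rw [hWgetD, hGgetD, hrest s hs, h2 s hs]
      congr 1
      by_cases hm : s ∈ li
      · rw [if_pos (List.mem_filter.mpr ⟨(PySem.Set.mem_ofList li s).mpr hm, by simpa [bne_iff_ne] using hs⟩)]
      · rw [if_neg (fun hc => hm ((PySem.Set.mem_ofList li s).mp (List.mem_of_mem_filter hc))),
          List.count_eq_zero.mpr hm]
        simp
    · rw [hWkeys]; exact PySem.Set.nodup_update _ _ h3

theorem pvPair (t : String) (rs : List (List String)) (hall : ∀ li ∈ rs, t ∈ li) :
    ∀ (w a : PySem.Dict String Int),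
      w.keys.filter (fun s => s != t) = a.keys →
      (∀ s, s ≠ t → w.getD s 0 = a.getD s 0) →
      w.keys.Nodup → a.keys.Nodup →
      ((rs.foldl (fun c li => pvApply t c (pvContrib li t)) w).keys.filter (fun s => s != t)
          = (rs.foldl (pvG t) a).keys ∧
        (∀ s, s ≠ t → (rs.foldl (fun c li => pvApply t c (pvContrib li t)) w).getD s 0
          = (rs.foldl (pvG t) a).getD s 0) ∧
        (rs.foldl (fun c li => pvApply t c (pvContrib li t)) w).keys.Nodup ∧
        (rs.foldl (pvG t) a).keys.Nodup) := by
  induction rs with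
  | nil => intro w a h1 h2 h3 h4; exact ⟨h1, h2, h3, h4⟩
  | cons li rs' ih =>
    intro w a h1 h2 h3 h4
    rw [List.foldl_cons, List.foldl_cons]
    obtain ⟨g1, g2, g3, g4⟩ := pvPairStep t li (hall li (List.mem_cons_self)) w a h1 h2 h3 h4
    exact ih (fun li' hm => hall li' (List.mem_cons_of_mem _ hm)) _ _ g1 g2 g3 g4

theorem pvErase_items (w : PySem.Dict String Int) (t : String) :
    (w.erase t).items = w.items.filter (fun p => !(p.1 == t)) := rfl

theorem pvFinal_eq (t : String) (w a : PySem.Dict String Int)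
    (h1 : w.keys.filter (fun s => s != t) = a.keys)
    (h2 : ∀ s, s ≠ t → w.getD s 0 = a.getD s 0)
    (h3 : w.keys.Nodup) (h4 : a.keys.Nodup) :
    (if w.contains t then w.erase t else w) = a := by
  have hmem_ne : ∀ s ∈ a.keys, s ≠ t := by
    intro s hs
    rw [← h1] at hs
    have := (List.mem_filter.mp hs).2
    simpa [bne_iff_ne] using this
  have hmap : (w.keys.filter (fun s => s != t)).map (fun s => (s, w.getD s 0))
      = a.keys.map (fun s => (s, a.getD s 0)) := by
    rw [h1]
    exact List.map_congr_left (fun s hs => by rw [h2 s (hmem_ne s hs)])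
  apply PySem.Dict.ext
  rw [PySem.Dict.items_eq_map_keys a h4 0]
  by_cases hc : w.contains t
  · rw [if_pos hc, pvErase_items, PySem.Dict.items_eq_map_keys w h3 0, List.filter_map]
    rw [← hmap]
    congr 1
  · rw [if_neg hc]
    rw [PySem.Dict.items_eq_map_keys w h3 0, ← hmap]
    congr 1
    have : w.keys.filter (fun s => s != t) = w.keys := by
      apply List.filter_eq_self.mpr
      intro s hs
      have hne : s ≠ t := by
        intro he
        subst he
        exact absurd ((PySem.Dict.contains_iff_mem_keys w s).mpr hs) (by simpa using hc)
      simpa [bne_iff_ne] using hne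
    rw [this]

theorem pvFoldG_filter (t : String) (lts : List (List String)) (c : PySem.Dict String Int) :
    lts.foldl (pvG t) c = (lts.filter (fun li => decide (t ∈ li))).foldl (pvG t) c := by
  rw [← PySem.List.foldl_ite_eq_foldl_filter (fun li => t ∈ li) (pvG t)]
  apply PySem.List.foldl_congr_mem
  intro acc li _
  by_cases hm : t ∈ li
  · rw [if_pos hm]
  · rw [if_neg hm, pvG_id t acc li hm]

theorem pvToken (lts : List (List String)) (t : String) :
    pvFinal t ((lts.filter (fun li => decide (t ∈ li))).map (fun li => pvContrib li t))
      = lts.foldl (pvG t) PySem.Dict.empty := by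
  rw [pvFoldG_filter]
  unfold pvFinal
  rw [List.foldl_map]
  have hall : ∀ li ∈ lts.filter (fun li => decide (t ∈ li)), t ∈ li := by
    intro li hm
    have := List.of_mem_filter hm
    simpa using this
  obtain ⟨g1, g2, g3, g4⟩ := pvPair t (lts.filter (fun li => decide (t ∈ li))) hall
    PySem.Dict.empty PySem.Dict.empty
    (by rw [PySem.Dict.keys_empty]; rfl)
    (fun s _ => rfl)
    (by rw [PySem.Dict.keys_empty]; exact List.nodup_nil)
    (by rw [PySem.Dict.keys_empty]; exact List.nodup_nil)
  exact pvFinal_eq t _ _ g1 g2 g3 g4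

-- ===== VERDICT (by name: the statement is the Claim_ definition above) =====
theorem pvSfold_nodup (lts : List (List String)) :
    (lts.foldl (fun s li => PySem.Set.update s li) ([] : PySem.Set String)).Nodup := by
  have main : ∀ (lts : List (List String)) (s0 : PySem.Set String), s0.Nodup →
      (lts.foldl (fun s li => PySem.Set.update s li) s0).Nodup := by
    intro lts
    induction lts with
    | nil => intro s0 h; exact h
    | cons li lts' ih =>
      intro s0 h
      exact ih _ (PySem.Set.nodup_update _ _ h)
  exact main lts [] List.nodup_nil

theorem pvA_getD (lts : List (List String)) (t : String) :
    ((lts.foldl (fun nb li => pvLoop (fun t => pvUpdA (li.filter (fun s => s != t))) nb li)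
        PySem.Dict.empty).getD t PySem.Dict.empty)
      = lts.foldl (pvG t) PySem.Dict.empty := by
  rw [PySem.Dict.getD_eq_get?_getD, pvAfold_get?]
  by_cases hall : ∀ li ∈ lts, t ∉ li
  · rw [if_pos hall]
    show PySem.Dict.empty = _
    exact ((PySem.List.foldl_congr_mem lts (pvG t) (fun c _ => c) _
      (fun acc li hm => pvG_id t acc li (hall li hm))).trans
      (PySem.List.foldl_ignore lts _)).symm
  · rw [if_neg hall, PySem.Dict.getD_empty]
    rfl

theorem build_neighborhood_dict_spec : Claim_equal_build_neighborhood_dict := by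
  intro lts _
  show build_neighborhood_dict lts = build_neighborhood_dict_alt lts
  rw [portA_eq, portB_eq]
  have hAkeys := pvAfold_keys lts PySem.Dict.empty
  rw [PySem.Dict.keys_empty] at hAkeys
  have hAnodup : (lts.foldl (fun nb li => pvLoop (fun t => pvUpdA (li.filter (fun s => s != t))) nb li)
      PySem.Dict.empty).keys.Nodup := by
    rw [hAkeys]; exact pvSfold_nodup lts
  have hBitems : ((pvOcc lts).items.foldl (fun nbs p =>
        nbs.insert p.1 (pvFinal p.1 p.2)) PySem.Dict.empty).items
      = (pvOcc lts).items.map (fun p => (p.1, pvFinal p.1 p.2)) := by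
    rw [PySem.Dict.items_foldl_insert_fresh (pvOcc lts).items Prod.fst
      (fun p => pvFinal p.1 p.2) PySem.Dict.empty
      (fun p _ => PySem.Dict.contains_empty p.1)
      (pvOcc_nodup lts)]
    rfl
  have hitems : (lts.foldl (fun nb li => pvLoop (fun t => pvUpdA (li.filter (fun s => s != t))) nb li)
        PySem.Dict.empty).items
      = ((pvOcc lts).items.foldl (fun nbs p => nbs.insert p.1 (pvFinal p.1 p.2)) PySem.Dict.empty).items := by
    rw [hBitems,
      PySem.Dict.items_eq_map_keys _ hAnodup PySem.Dict.empty,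
      PySem.Dict.items_eq_map_keys (pvOcc lts) (pvOcc_nodup lts) [],
      List.map_map, pvOcc_keys, ← hAkeys]
    apply List.map_congr_left
    intro t _
    show (t, _) = (t, pvFinal t ((pvOcc lts).getD t []))
    rw [pvOcc_getD, pvToken, pvA_getD]
  rw [hitems]
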